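-- pv_equiv track=rewrite | github.com/xCallmeEDtw/xCallmeDcBot | Modules/vals.py | ReOrg
-- ===== SOURCE A (Python) =====
-- def if_num(word):
-- 	if '%' in word:
-- 		word = word[:-1]
-- 	if ',' in word:
-- 		word = word.translate({ord("," ): None})
-- 	try:
-- 		word = float(word)
-- 	except:
-- 		return(False)
-- 	return(True)
--
-- def ReOrg(mylist):
-- 	new = []
-- 	temp = ""
-- 	mydict = {}
-- 	for i in range(len(mylist)):
-- 		if if_num(mylist[i]):
-- 			new.append(temp)
-- 			new.append(mylist[i])
-- 			temp = ""
-- 		else: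
-- 			temp += (mylist[i] + " ")
-- 	for i in range(len(new)):
-- 		if not(if_num(new[i])):
-- 			new[i] = new[i][:-1]
-- 	for i in range(0,len(new)-1,2):
-- 		mydict[new[i]] = new[i+1]
--
--
--
-- 	return(mydict)
-- ===== SOURCE B (Python) =====
-- def if_num(word):
-- 	if '%' in word:
-- 		word = word[:-1]
-- 	if ',' in word:
-- 		word = word.translate({ord("," ): None})
-- 	try:
-- 		word = float(word)
-- 	except:
-- 		return(False)
-- 	return(True)
--
-- def ReOrg(mylist):
-- 	mydict = {}
-- 	parts = []
-- 	for word in mylist: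
-- 		if if_num(word):
-- 			mydict[' '.join(parts)] = word
-- 			parts = []
-- 		else:
-- 			parts.append(word)
-- 	return mydict
-- ===== Notes on version B (the rewrite author's own statement) =====
-- stated objective: simpler
-- what changed: B replaces A's three passes (build a flat alternating list with a trailing-space label accumulator, re-scan it to strip trailing spaces, then pair consecutive entries into the dict) with one direct pass that keeps the current label's words in a list and inserts ' '.join(parts) into the dict as soon as a numeric token appears.
import Mathlib
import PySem

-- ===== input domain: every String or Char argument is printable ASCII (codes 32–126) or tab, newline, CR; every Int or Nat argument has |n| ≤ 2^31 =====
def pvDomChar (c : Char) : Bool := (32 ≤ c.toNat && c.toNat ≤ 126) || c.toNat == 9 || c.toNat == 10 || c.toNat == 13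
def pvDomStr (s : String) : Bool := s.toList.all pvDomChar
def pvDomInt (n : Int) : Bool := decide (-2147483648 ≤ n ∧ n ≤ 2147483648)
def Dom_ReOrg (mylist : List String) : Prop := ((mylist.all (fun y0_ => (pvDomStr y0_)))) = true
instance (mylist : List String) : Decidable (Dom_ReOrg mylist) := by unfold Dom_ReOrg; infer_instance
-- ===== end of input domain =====

-- B replaces A's three passes (flat alternating list + trailing-space labels, strip pass, pairing pass)
-- with one pass that keeps the current label's words in a list and inserts ' '.join(parts) directly.

-- ===== PORT A =====
-- A-side hand port of the builtin float(s) acceptance test (exact on the printable-ASCII domain),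
-- following the grammar: strip, optional sign, (inf|infinity|nan | mantissa [eE exponent]).
-- digitpart ::= digit (["_"] digit)*   — tail recognizer
def pvDpartRest : List Char → Bool
  | [] => true
  | '_' :: c :: rest => c.isDigit && pvDpartRest rest
  | c :: rest => c.isDigit && pvDpartRest rest

def pvDpart : List Char → Bool
  | [] => false
  | c :: rest => c.isDigit && pvDpartRest rest

-- mantissa: digitpart | digitpart "." [digitpart] | "." digitpart
def pvMantOk (cs : List Char) : Bool :=
  if cs.contains '.' then
    let a := cs.takeWhile (fun c => c ≠ '.')
    let b := (cs.dropWhile (fun c => c ≠ '.')).tail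
    (a.isEmpty || pvDpart a) && (b.isEmpty || pvDpart b) && !(a.isEmpty && b.isEmpty)
  else pvDpart cs

-- exponent tail: [sign] digitpart
def pvExpOk : List Char → Bool
  | '+' :: rest => pvDpart rest
  | '-' :: rest => pvDpart rest
  | cs => pvDpart cs

def pvNumOk (cs : List Char) : Bool :=
  if cs.any (fun c => c = 'e' || c = 'E') then
    pvMantOk (cs.takeWhile (fun c => !(c = 'e' || c = 'E'))) &&
      pvExpOk ((cs.dropWhile (fun c => !(c = 'e' || c = 'E'))).tail)
  else pvMantOk cs

def pvDropSign : List Char → List Char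
  | '+' :: rest => rest
  | '-' :: rest => rest
  | cs => cs

-- body after stripping whitespace and one optional sign
def pvFloatCore (t : List Char) : Bool :=
  if PySem.Chars.lower t = "inf".toList || PySem.Chars.lower t = "infinity".toList ||
      PySem.Chars.lower t = "nan".toList then true
  else pvNumOk t

-- float(s) succeeds  (strip whitespace, optional sign, inf/infinity/nan or numeric literal)
def pvFloatOk (cs : List Char) : Bool :=
  pvFloatCore (pvDropSign (PySem.Chars.strip cs))

-- A's if_num, on the char list of the word
def ifNumChars (w : List Char) : Bool :=
  let w1 := if PySem.Chars.isIn ['%'] w then PySem.Chars.slice w none (some (-1)) else w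
  -- word.translate({ord(','): None}) removes every comma
  let w2 := if PySem.Chars.isIn [','] w1 then w1.filter (fun c => c ≠ ',') else w1
  pvFloatOk w2

def ifNum (word : String) : Bool := ifNumChars word.toList

-- temp is carried as List Char (the char list of Python's accumulator string).
-- In the third loop the indices i, i+1 of range(0, len(new)-1, 2) are always in range
-- (new always has even length), so pyGetD's default "" is never used.
def ReOrg (mylist : List String) : List (String × String) :=
  let st := mylist.foldl
    (fun (st : List String × List Char) w =>
      if ifNum w then (st.1 ++ [String.ofList st.2, w], []) else (st.1, st.2 ++ w.toList ++ [' ']))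
    ([], [])
  let new := st.1
  let new2 := new.map (fun s => if !(ifNum s) then PySem.Str.slice s none (some (-1)) else s)
  let d := (PySem.List.pyRange 0 ((new2.length : Int) - 1) 2).foldl
    (fun (d : PySem.Dict String String) i =>
      d.insert (PySem.List.pyGetD new2 i "") (PySem.List.pyGetD new2 (i + 1) ""))
    PySem.Dict.empty
  d.items

-- ===== PORT B =====
-- B-side hand port of the builtin float(s) acceptance test (exact on the printable-ASCII domain),
-- written as a sequential recursive-descent consumer: eat a digitpart, then an optional '.'+digitpart,
-- then an optional exponent, and accept iff everything was consumed.
-- consume (["_"] digit | digit)* greedily, return the unconsumed rest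
def eatDigTail : List Char → List Char
  | '_' :: c :: r => if c.isDigit then eatDigTail r else '_' :: c :: r
  | c :: r => if c.isDigit then eatDigTail r else c :: r
  | [] => []

-- consume a digitpart; second component: did we consume at least one digit?
def eatDig (s : List Char) : List Char × Bool :=
  match s with
  | c :: r => if c.isDigit then (eatDigTail r, true) else (s, false)
  | [] => ([], false)

-- the whole string is one digitpart
def dpartAll (s : List Char) : Bool := (eatDig s).2 && (eatDig s).1.isEmpty

-- exponent body: optional sign, then a full digitpart
def eatExpOk (s : List Char) : Bool :=
  match s with
  | c :: r => if c = '+' || c = '-' then dpartAll r else dpartAll s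
  | [] => false

-- consume a mantissa (digits, optional '.' + digits, at least one digit), return the rest
def eatMant (s : List Char) : Option (List Char) :=
  match eatDig s with
  | ('.' :: r2, d1) =>
      match eatDig r2 with
      | (r3, d2) => if d1 || d2 then some r3 else none
  | (r1, d1) => if d1 then some r1 else none

-- numeric literal: mantissa, then nothing or 'e'/'E' + exponent body
def numOkAlt (t : List Char) : Bool :=
  match eatMant t with
  | none => false
  | some [] => true
  | some (c :: r) => (c = 'e' || c = 'E') && eatExpOk r

def dropSignB (s : List Char) : List Char :=
  match s with
  | c :: r => if c = '+' || c = '-' then r else c :: r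
  | [] => []

def floatOkAlt (cs : List Char) : Bool :=
  let t := dropSignB (PySem.Chars.strip cs)
  ["inf", "infinity", "nan"].contains (String.ofList (PySem.Chars.lower t)) || numOkAlt t

-- B's if_num (same Python helper; the float() builtin is ported by the consumer above)
def ifNumAlt (word : String) : Bool :=
  let w := word.toList
  let w1 := if w.contains '%' then w.dropLast else w
  let w2 := if w1.contains ',' then w1.filter (fun c => c ≠ ',') else w1
  floatOkAlt w2

-- B's loop: current label words in `parts`, insert ' '.join(parts) on each numeric token
def reorgGo (d : PySem.Dict String String) (parts : List String) :
    List String → PySem.Dict String String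
  | [] => d
  | w :: ws =>
      if ifNumAlt w then reorgGo (d.insert (PySem.Str.join " " parts) w) [] ws
      else reorgGo d (parts ++ [w]) ws

def ReOrg_alt (mylist : List String) : List (String × String) :=
  (reorgGo PySem.Dict.empty [] mylist).items

-- ===== PRECONDITION & SPEC =====
def Spec_ReOrg (mylist : List String) (out : List (String × String)) : Prop := out = ReOrg_alt mylist
instance (mylist : List String) (out : List (String × String)) : Decidable (Spec_ReOrg mylist out) := by unfold Spec_ReOrg; infer_instance

-- ===== CLAIM (what is proved, stated in full; the proofs are below) =====
def Claim_equal_ReOrg : Prop := ∀ (mylist : List String), Dom_ReOrg mylist → Spec_ReOrg mylist (ReOrg mylist)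

-- ===== LEMMAS AND PROOFS =====

-- ========== A-side: flattening the three passes ==========

-- the char list of A's accumulator string when the current label's words are `parts`
def labelChars (parts : List String) : List Char :=
  (parts.map (fun p => p.toList ++ [' '])).flatten

-- A's first loop, unrolled
def newOf : List String → List Char → List String
  | [], _ => []
  | w :: ws, temp =>
      if ifNum w then String.ofList temp :: w :: newOf ws []
      else newOf ws (temp ++ w.toList ++ [' '])

-- the sequence of (key, value) insertions
def seqOf : List String → List String → List (String × String)
  | [], _ => []
  | w :: ws, parts =>
      if ifNum w then (PySem.Str.join " " parts, w) :: seqOf ws []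
      else seqOf ws (parts ++ [w])

def insertAll (d : PySem.Dict String String) (l : List (String × String)) : PySem.Dict String String :=
  l.foldl (fun d p => d.insert p.1 p.2) d

theorem foldA (ws : List String) : ∀ (acc : List String) (temp : List Char),
    (ws.foldl (fun (st : List String × List Char) w =>
      if ifNum w then (st.1 ++ [String.ofList st.2, w], []) else (st.1, st.2 ++ w.toList ++ [' ']))
      (acc, temp)).1 = acc ++ newOf ws temp := by
  induction ws with
  | nil => simp [newOf]
  | cons w ws ih =>
    intro acc temp
    cases h : ifNum w with
    | true => simpa [newOf, h] using ih (acc ++ [String.ofList temp, w]) []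
    | false => simpa [newOf, h] using ih acc (temp ++ w.toList ++ [' '])

-- ========== the float-grammar facts ==========

def okChar (c : Char) : Bool :=
  c.isDigit || c = '_' || c = '.' || c = '+' || c = '-' ||
    PySem.Chars.lowerChar c ∈ ['e', 'i', 'n', 'f', 'a', 't', 'y']

theorem mem_dropWhile_of_not {α : Type} {p : α → Bool} {c : α} {l : List α}
    (h : c ∈ l) (hp : p c = false) : c ∈ l.dropWhile p := by
  have hsplit : c ∈ l.takeWhile p ++ l.dropWhile p := by
    rw [List.takeWhile_append_dropWhile]; exact h
  rcases List.mem_append.mp hsplit with h1 | h1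
  · exact absurd (List.mem_takeWhile_imp h1) (by simp [hp])
  · exact h1

theorem dpartRest_chars : ∀ (cs : List Char), pvDpartRest cs = true →
    ∀ c ∈ cs, c.isDigit ∨ c = '_' := by
  intro cs
  induction cs using pvDpartRest.induct with
  | case1 => simp
  | case2 c rest ih =>
    intro h d hd
    simp only [pvDpartRest, Bool.and_eq_true] at h
    simp only [List.mem_cons] at hd
    rcases hd with rfl | rfl | hd
    · right; rfl
    · left; exact h.1
    · exact ih h.2 d hd
  | case3 c rest hne ih =>
    intro h d hd
    simp only [List.mem_cons] at hd
    rw [pvDpartRest.eq_def] at h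
    split at h
    next heq => exact absurd heq (List.cons_ne_nil _ _)
    next c1 rest1 heq =>
      injection heq with h1 h2
      exact (hne c1 rest1 h1 h2).elim
    next c2 rest2 heq =>
      injection heq with h1 h2
      subst h1; subst h2
      simp only [Bool.and_eq_true] at h
      rcases hd with rfl | hd
      · left; exact h.1
      · exact ih h.2 d hd

theorem dpart_chars (cs : List Char) (h : pvDpart cs = true) :
    ∀ c ∈ cs, c.isDigit ∨ c = '_' := by
  match cs with
  | [] => simp [pvDpart] at h
  | c0 :: rest =>
    simp only [pvDpart, Bool.and_eq_true] at h
    intro d hd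
    rcases List.mem_cons.mp hd with rfl | hd
    · left; exact h.1
    · exact dpartRest_chars rest h.2 d hd

theorem mantOk_chars (cs : List Char) (h : pvMantOk cs = true) :
    ∀ c ∈ cs, c.isDigit ∨ c = '_' ∨ c = '.' := by
  intro c hc
  unfold pvMantOk at h
  by_cases hdot : cs.contains '.'
  · rw [if_pos hdot] at h
    simp only [Bool.and_eq_true, Bool.or_eq_true] at h
    have hsplit : c ∈ cs.takeWhile (fun c => c ≠ '.') ++ cs.dropWhile (fun c => c ≠ '.') := by
      rw [List.takeWhile_append_dropWhile]; exact hc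
    rcases List.mem_append.mp hsplit with h1 | h1
    · rcases h.1.1 with ha | ha
      · rw [List.isEmpty_iff.mp ha] at h1; simp at h1
      · rcases dpart_chars _ ha c h1 with hh | hh
        · exact Or.inl hh
        · exact Or.inr (Or.inl hh)
    · have hne : cs.dropWhile (fun c => c ≠ '.') ≠ [] := by
        intro hnil
        have := (List.dropWhile_eq_nil_iff).mp hnil
        have : ('.' : Char) ≠ '.' := by
          simpa using this '.' (by simpa using hdot)
        exact this rfl
      obtain ⟨hd, tl, heq⟩ := List.exists_cons_of_ne_nil hne
      have hhd' : hd = '.' := by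
        have h1 := List.head_dropWhile_not (fun c => decide (c ≠ '.')) hne
        simp only [heq, List.head_cons] at h1
        simpa using h1
      rw [heq] at h1
      rcases List.mem_cons.mp h1 with rfl | h1
      · exact Or.inr (Or.inr hhd')
      · have hb := h.1.2
        rcases hb with hb | hb
        · rw [heq] at hb; simp [List.isEmpty_iff] at hb
          rw [hb] at h1; simp at h1
        · have : c ∈ (cs.dropWhile (fun c => c ≠ '.')).tail := by rw [heq]; simpa using h1
          rcases dpart_chars _ hb c this with hh | hh
          · exact Or.inl hh
          · exact Or.inr (Or.inl hh)
  · rw [if_neg hdot] at h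
    rcases dpart_chars _ h c hc with hh | hh
    · exact Or.inl hh
    · exact Or.inr (Or.inl hh)

theorem expOk_chars (cs : List Char) (h : pvExpOk cs = true) :
    ∀ c ∈ cs, c.isDigit ∨ c = '_' ∨ c = '+' ∨ c = '-' := by
  intro c hc
  rw [pvExpOk.eq_def] at h
  split at h
  next rest =>
    rcases List.mem_cons.mp hc with rfl | hc
    · exact Or.inr (Or.inr (Or.inl rfl))
    · rcases dpart_chars _ h c hc with hh | hh
      · exact Or.inl hh
      · exact Or.inr (Or.inl hh)
  next rest =>
    rcases List.mem_cons.mp hc with rfl | hc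
    · exact Or.inr (Or.inr (Or.inr rfl))
    · rcases dpart_chars _ h c hc with hh | hh
      · exact Or.inl hh
      · exact Or.inr (Or.inl hh)
  next =>
    rcases dpart_chars _ h c hc with hh | hh
    · exact Or.inl hh
    · exact Or.inr (Or.inl hh)

theorem okChar_cases {c : Char}
    (h : c.isDigit = true ∨ c = '_' ∨ c = '.' ∨ c = '+' ∨ c = '-' ∨ c = 'e' ∨ c = 'E') :
    okChar c = true := by
  rcases h with h | rfl | rfl | rfl | rfl | rfl | rfl
  · simp [okChar, h]
  all_goals decide

theorem numOk_chars (cs : List Char) (h : pvNumOk cs = true) :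
    ∀ c ∈ cs, okChar c = true := by
  intro c hc
  unfold pvNumOk at h
  by_cases he : cs.any (fun c => c = 'e' || c = 'E') = true
  · rw [if_pos he] at h
    simp only [Bool.and_eq_true] at h
    have hsplit : c ∈ cs.takeWhile (fun c => !(c = 'e' || c = 'E')) ++
        cs.dropWhile (fun c => !(c = 'e' || c = 'E')) := by
      rw [List.takeWhile_append_dropWhile]; exact hc
    rcases List.mem_append.mp hsplit with h1 | h1
    · rcases mantOk_chars _ h.1 c h1 with hh | hh | hh
      · exact okChar_cases (Or.inl hh)
      · exact okChar_cases (Or.inr (Or.inl hh))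
      · exact okChar_cases (Or.inr (Or.inr (Or.inl hh)))
    · have hne : cs.dropWhile (fun c => !(c = 'e' || c = 'E')) ≠ [] := by
        intro hnil
        obtain ⟨e0, he0, he0'⟩ := List.any_eq_true.mp he
        have := (List.dropWhile_eq_nil_iff).mp hnil e0 he0
        simp only [Bool.not_eq_eq_eq_not, Bool.not_true] at this
        rw [this] at he0'; exact Bool.false_ne_true he0'
      obtain ⟨hd, tl, heq⟩ := List.exists_cons_of_ne_nil hne
      have hhd' : hd = 'e' ∨ hd = 'E' := by
        have h1 := List.head_dropWhile_not (fun c => !(c = 'e' || c = 'E')) hne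
        simp only [heq, List.head_cons] at h1
        simp only [Bool.not_eq_eq_eq_not, Bool.not_false, Bool.or_eq_true, decide_eq_true_eq] at h1
        tauto
      rw [heq] at h1
      rcases List.mem_cons.mp h1 with rfl | h1
      · rcases hhd' with rfl | rfl
        · exact okChar_cases (Or.inr (Or.inr (Or.inr (Or.inr (Or.inr (Or.inl rfl))))))
        · exact okChar_cases (Or.inr (Or.inr (Or.inr (Or.inr (Or.inr (Or.inr rfl))))))
      · have hmem : c ∈ (cs.dropWhile (fun c => !(c = 'e' || c = 'E'))).tail := by
          rw [heq]; simpa using h1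
        rcases expOk_chars _ h.2 c hmem with hh | hh | hh | hh
        · exact okChar_cases (Or.inl hh)
        · exact okChar_cases (Or.inr (Or.inl hh))
        · exact okChar_cases (Or.inr (Or.inr (Or.inr (Or.inl hh))))
        · exact okChar_cases (Or.inr (Or.inr (Or.inr (Or.inr (Or.inl hh)))))
  · rw [if_neg he] at h
    rcases mantOk_chars _ h c hc with hh | hh | hh
    · exact okChar_cases (Or.inl hh)
    · exact okChar_cases (Or.inr (Or.inl hh))
    · exact okChar_cases (Or.inr (Or.inr (Or.inl hh)))

theorem core_chars (t : List Char) (h : pvFloatCore t = true) :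
    ∀ c ∈ t, okChar c = true := by
  intro c hc
  unfold pvFloatCore at h
  split at h
  next hsp =>
    have hmem : PySem.Chars.lowerChar c ∈ PySem.Chars.lower t :=
      List.mem_map_of_mem hc
    simp only [Bool.or_eq_true, decide_eq_true_eq] at hsp
    have hlit : PySem.Chars.lowerChar c ∈ ['e', 'i', 'n', 'f', 'a', 't', 'y'] := by
      have e1 : ("infinity".toList) = ['i', 'n', 'f', 'i', 'n', 'i', 't', 'y'] := rfl
      have e2 : ("nan".toList) = ['n', 'a', 'n'] := rfl
      have e3 : ("inf".toList) = ['i', 'n', 'f'] := rfl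
      rcases hsp with (hh | hh) | hh <;> rw [hh] at hmem
      · rw [e3] at hmem
        simp only [List.mem_cons] at *
        tauto
      · rw [e1] at hmem
        simp only [List.mem_cons] at *
        tauto
      · rw [e2] at hmem
        simp only [List.mem_cons] at *
        tauto
    simp [okChar, hlit]
  next => exact numOk_chars t h c hc

theorem mem_dropSign {c : Char} {cs : List Char} (h : c ∈ cs) (h1 : c ≠ '+') (h2 : c ≠ '-') :
    c ∈ pvDropSign cs := by
  rw [pvDropSign.eq_def]
  split
  next rest => rcases List.mem_cons.mp h with rfl | hm
               · exact absurd rfl h1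
               · exact hm
  next rest => rcases List.mem_cons.mp h with rfl | hm
               · exact absurd rfl h2
               · exact hm
  next => exact h

theorem mem_strip_of_not_ws {c : Char} {cs : List Char} (h : c ∈ cs)
    (hw : PySem.Chars.isspace c = false) : c ∈ PySem.Chars.strip cs := by
  have h1 : c ∈ PySem.Chars.lstrip cs := mem_dropWhile_of_not h hw
  have h2 : c ∈ (PySem.Chars.lstrip cs).reverse := List.mem_reverse.mpr h1
  have h3 : c ∈ (PySem.Chars.lstrip cs).reverse.dropWhile PySem.Chars.isspace :=
    mem_dropWhile_of_not h2 hw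
  exact List.mem_reverse.mpr h3

-- a '%' or a ' ' that survives strip/dropSign kills float()
theorem floatOk_false_of_bad {c : Char} {cs : List Char}
    (hmem : c ∈ pvDropSign (PySem.Chars.strip cs)) (hbad : okChar c = false) :
    pvFloatOk cs = false := by
  cases hf : pvFloatOk cs with
  | false => rfl
  | true =>
    have := core_chars _ hf c hmem
    rw [hbad] at this
    exact absurd this Bool.false_ne_true

theorem floatOk_false_of_pct {cs : List Char} (h : '%' ∈ cs) : pvFloatOk cs = false := by
  have h1 : '%' ∈ PySem.Chars.strip cs := mem_strip_of_not_ws h (by decide)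
  have h2 : '%' ∈ pvDropSign (PySem.Chars.strip cs) :=
    mem_dropSign h1 (by decide) (by decide)
  exact floatOk_false_of_bad h2 (by decide)

-- strip lemmas
theorem strip_append_ws {u v : List Char} (hv : ∀ c ∈ v, PySem.Chars.isspace c = true) :
    PySem.Chars.strip (u ++ v) = PySem.Chars.strip u := by
  have hrs : ∀ (w : List Char), PySem.Chars.rstrip (w ++ v) = PySem.Chars.rstrip w := by
    intro w
    unfold PySem.Chars.rstrip
    rw [List.reverse_append, List.dropWhile_append]
    have : v.reverse.dropWhile PySem.Chars.isspace = [] :=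
      List.dropWhile_eq_nil_iff.mpr (fun x hx => hv x (List.mem_reverse.mp hx))
    simp [this]
  unfold PySem.Chars.strip PySem.Chars.lstrip
  rw [List.dropWhile_append]
  by_cases hemp : (u.dropWhile PySem.Chars.isspace).isEmpty = true
  · rw [if_pos hemp]
    have hv' : v.dropWhile PySem.Chars.isspace = [] :=
      List.dropWhile_eq_nil_iff.mpr hv
    rw [hv', List.isEmpty_iff.mp hemp]
  · rw [if_neg hemp]
    exact hrs _

theorem strip_ws_append {u v : List Char} (hu : ∀ c ∈ u, PySem.Chars.isspace c = true) :
    PySem.Chars.strip (u ++ v) = PySem.Chars.strip v := by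
  unfold PySem.Chars.strip PySem.Chars.lstrip
  rw [List.dropWhile_append]
  have hu' : u.dropWhile PySem.Chars.isspace = [] :=
    List.dropWhile_eq_nil_iff.mpr hu
  simp [hu']

theorem mem_space_strip_middle {u v : List Char}
    (hu : ∃ c ∈ u, PySem.Chars.isspace c = false) (hv : ∃ c ∈ v, PySem.Chars.isspace c = false) :
    ' ' ∈ PySem.Chars.strip (u ++ ' ' :: v) := by
  obtain ⟨cu, hcu, hcu'⟩ := hu
  obtain ⟨cv, hcv, hcv'⟩ := hv
  have hlu : (u.dropWhile PySem.Chars.isspace).isEmpty = false := by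
    rw [Bool.eq_false_iff]
    intro hemp
    have := List.dropWhile_eq_nil_iff.mp (List.isEmpty_iff.mp hemp) cu hcu
    rw [this] at hcu'; simp at hcu'
  have h1 : PySem.Chars.lstrip (u ++ ' ' :: v) =
      PySem.Chars.lstrip u ++ ' ' :: v := by
    unfold PySem.Chars.lstrip
    rw [List.dropWhile_append, hlu]
    simp
  unfold PySem.Chars.strip
  rw [h1]
  unfold PySem.Chars.rstrip
  rw [show (PySem.Chars.lstrip u ++ ' ' :: v).reverse =
      v.reverse ++ ' ' :: (PySem.Chars.lstrip u).reverse by simp]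
  rw [List.dropWhile_append]
  have hlv : (v.reverse.dropWhile PySem.Chars.isspace).isEmpty = false := by
    rw [Bool.eq_false_iff]
    intro hemp
    have := List.dropWhile_eq_nil_iff.mp (List.isEmpty_iff.mp hemp) cv
      (List.mem_reverse.mpr hcv)
    rw [this] at hcv'; simp at hcv'
  rw [hlv]
  simp

theorem floatOk_congr_strip {a b : List Char} (h : PySem.Chars.strip a = PySem.Chars.strip b) :
    pvFloatOk a = pvFloatOk b := by
  simp [pvFloatOk, h]

-- the central semantic fact: gluing float()-rejected pieces with spaces is float()-rejected
theorem glue_floatOk_false : ∀ (qs : List (List Char)), (∀ q ∈ qs, pvFloatOk q = false) →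
    pvFloatOk ((qs.map (fun q => q ++ [' '])).flatten) = false := by
  intro qs
  induction qs with
  | nil => intro _; decide
  | cons q qs ih =>
    intro h
    have hq := h q (List.mem_cons_self ..)
    have hqs := ih (fun r hr => h r (List.mem_cons_of_mem _ hr))
    simp only [List.map_cons, List.flatten_cons]
    by_cases hu : ∃ c ∈ q, PySem.Chars.isspace c = false
    · by_cases hv : ∃ c ∈ (qs.map (fun q => q ++ [' '])).flatten,
          PySem.Chars.isspace c = false
      · have hT : (q ++ [' ']) ++ (qs.map (fun q => q ++ [' '])).flatten =
            q ++ ' ' :: (qs.map (fun q => q ++ [' '])).flatten := by simp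
        rw [hT]
        have h1 := mem_space_strip_middle hu hv
        exact floatOk_false_of_bad (mem_dropSign h1 (by decide) (by decide)) (by decide)
      · have hv' : ∀ c ∈ ' ' :: (qs.map (fun q => q ++ [' '])).flatten,
            PySem.Chars.isspace c = true := by
          intro c hc
          rcases List.mem_cons.mp hc with rfl | hc
          · decide
          · by_contra hcon
            exact hv ⟨c, hc, Bool.eq_false_iff.mpr hcon⟩
        have hT : (q ++ [' ']) ++ (qs.map (fun q => q ++ [' '])).flatten =
            q ++ ' ' :: (qs.map (fun q => q ++ [' '])).flatten := by simp
        rw [hT, floatOk_congr_strip (strip_append_ws hv')]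
        exact hq
    · have hu' : ∀ c ∈ q ++ [' '], PySem.Chars.isspace c = true := by
        intro c hc
        rcases List.mem_append.mp hc with hc | hc
        · by_contra hcon
          exact hu ⟨c, hc, Bool.eq_false_iff.mpr hcon⟩
        · rcases List.mem_singleton.mp hc with rfl
          decide
      rw [floatOk_congr_strip (strip_ws_append hu')]
      exact hqs

-- ========== equivalence of the two float() ports ==========

theorem isDigit_ne {c : Char} (h : c.isDigit = true) :
    c ≠ '_' ∧ c ≠ '.' ∧ c ≠ 'e' ∧ c ≠ 'E' := by
  refine ⟨?_, ?_, ?_, ?_⟩ <;> (rintro rfl; exact absurd h (by decide))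

theorem eatDigTail_cons (c : Char) (r : List Char)
    (hne : ∀ (c1 : Char) (r1 : List Char), c = '_' → r = c1 :: r1 → False) :
    eatDigTail (c :: r) = if c.isDigit then eatDigTail r else c :: r := by
  rw [eatDigTail.eq_def]
  split
  next c1 r1 heq =>
    injection heq with h1 h2
    exact (hne c1 r1 h1 h2).elim
  next c2 r2 heq =>
    injection heq with h1 h2
    subst h1; subst h2; rfl
  next heq => exact absurd heq (List.cons_ne_nil _ _)

theorem pvDpartRest_cons (c : Char) (r : List Char)
    (hne : ∀ (c1 : Char) (r1 : List Char), c = '_' → r = c1 :: r1 → False) :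
    pvDpartRest (c :: r) = (c.isDigit && pvDpartRest r) := by
  rw [pvDpartRest.eq_def]
  split
  next heq => exact absurd heq (List.cons_ne_nil _ _)
  next c1 r1 heq =>
    injection heq with h1 h2
    exact (hne c1 r1 h1 h2).elim
  next c2 r2 heq =>
    injection heq with h1 h2
    subst h1; subst h2; rfl

theorem tailEmpty (r : List Char) : (eatDigTail r).isEmpty = pvDpartRest r := by
  induction r using eatDigTail.induct with
  | case1 c r hd ih => simp [eatDigTail, pvDpartRest, hd, ih]
  | case2 c r hd =>
    simp only [Bool.not_eq_true] at hd
    simp [eatDigTail, pvDpartRest, hd]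
  | case3 c r hne hd ih =>
    rw [eatDigTail_cons c r (fun c1 r1 h1 h2 => hne c1 r1 h1 h2),
      pvDpartRest_cons c r (fun c1 r1 h1 h2 => hne c1 r1 h1 h2)]
    simp [hd, ih]
  | case4 c r hne hd =>
    simp only [Bool.not_eq_true] at hd
    rw [eatDigTail_cons c r (fun c1 r1 h1 h2 => hne c1 r1 h1 h2),
      pvDpartRest_cons c r (fun c1 r1 h1 h2 => hne c1 r1 h1 h2)]
    simp [hd]
  | case5 => rfl

theorem dpartAll_eq (s : List Char) : dpartAll s = pvDpart s := by
  cases s with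
  | nil => decide
  | cons c r =>
    by_cases hd : c.isDigit = true
    · simp [dpartAll, eatDig, pvDpart, hd, tailEmpty r]
    · simp only [Bool.not_eq_true] at hd
      simp [dpartAll, eatDig, pvDpart, hd]

theorem eatExpOk_eq (s : List Char) : eatExpOk s = pvExpOk s := by
  cases s with
  | nil => decide
  | cons c r =>
    by_cases hp : c = '+'
    · subst hp; simp [eatExpOk, pvExpOk, dpartAll_eq]
    · by_cases hm : c = '-'
      · subst hm; simp [eatExpOk, pvExpOk, dpartAll_eq]
      · rw [show eatExpOk (c :: r) = dpartAll (c :: r) by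
          simp [eatExpOk, hp, hm]]
        rw [pvExpOk.eq_def]
        split
        next heq => injection heq with h1 _; exact absurd h1 hp
        next heq => injection heq with h1 _; exact absurd h1 hm
        next => exact dpartAll_eq _

theorem dropSignB_eq (s : List Char) : dropSignB s = pvDropSign s := by
  cases s with
  | nil => rfl
  | cons c r =>
    by_cases hp : c = '+'
    · subst hp; simp [dropSignB, pvDropSign]
    · by_cases hm : c = '-'
      · subst hm; simp [dropSignB, pvDropSign]
      · rw [show dropSignB (c :: r) = c :: r by simp [dropSignB, hp, hm]]
        rw [pvDropSign.eq_def]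
        split
        next heq => injection heq with h1 _; exact absurd h1 hp
        next heq => injection heq with h1 _; exact absurd h1 hm
        next => rfl

theorem eatDigTail_append (u : List Char) (hu : pvDpartRest u = true) (r : List Char)
    (hr : ∀ c, r.head? = some c → c.isDigit = false ∧ c ≠ '_') :
    eatDigTail (u ++ r) = r := by
  induction u using pvDpartRest.induct with
  | case1 =>
    cases r with
    | nil => rfl
    | cons c r' =>
      obtain ⟨hcd, hcu⟩ := hr c rfl
      rw [List.nil_append, eatDigTail_cons c r' (fun c1 r1 h1 _ => hcu h1)]
      simp [hcd]
  | case2 c rest ih =>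
    simp only [pvDpartRest, Bool.and_eq_true] at hu
    simp only [List.cons_append]
    simp [eatDigTail, hu.1, ih hu.2]
  | case3 c rest hne ih =>
    rw [pvDpartRest_cons c rest (fun c1 r1 h1 h2 => hne c1 r1 h1 h2)] at hu
    simp only [Bool.and_eq_true] at hu
    have hcu : c ≠ '_' := (isDigit_ne hu.1).1
    rw [List.cons_append, eatDigTail_cons c (rest ++ r) (fun c1 r1 h1 _ => hcu h1)]
    simp [hu.1, ih hu.2]

theorem eatDig_append (p r : List Char) (hp : pvDpart p = true)
    (hr : ∀ c, r.head? = some c → c.isDigit = false ∧ c ≠ '_') :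
    eatDig (p ++ r) = (r, true) := by
  cases p with
  | nil => simp [pvDpart] at hp
  | cons c rest =>
    simp only [pvDpart, Bool.and_eq_true] at hp
    simp [eatDig, hp.1, eatDigTail_append rest hp.2 r hr]

theorem eatDigTail_decomp (s : List Char) :
    ∃ p, s = p ++ eatDigTail s ∧ pvDpartRest p = true := by
  induction s using eatDigTail.induct with
  | case1 c r hd ih =>
    obtain ⟨p, hp1, hp2⟩ := ih
    refine ⟨'_' :: c :: p, ?_, ?_⟩
    · simp [eatDigTail, hd]
      exact hp1
    · simp [pvDpartRest, hd, hp2]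
  | case2 c r hd =>
    simp only [Bool.not_eq_true] at hd
    exact ⟨[], by simp [eatDigTail, hd], rfl⟩
  | case3 c r hne hd ih =>
    obtain ⟨p, hp1, hp2⟩ := ih
    have hcu : c ≠ '_' := (isDigit_ne hd).1
    refine ⟨c :: p, ?_, ?_⟩
    · rw [eatDigTail_cons c r (fun c1 r1 h1 _ => hcu h1)]
      simp [hd]
      exact hp1
    · rw [pvDpartRest_cons c p (fun c1 r1 h1 _ => hcu h1)]
      simp [hd, hp2]
  | case4 c r hne hd =>
    simp only [Bool.not_eq_true] at hd
    have : eatDigTail (c :: r) = c :: r := by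
      rw [eatDigTail.eq_def]
      split
      next c1 r1 heq =>
        injection heq with h1 h2
        exact (hne c1 r1 h1 h2).elim
      next c2 r2 heq =>
        injection heq with h1 h2
        subst h1; subst h2
        simp [hd]
      next heq => exact absurd heq (List.cons_ne_nil _ _)
    exact ⟨[], by simp [this], rfl⟩
  | case5 => exact ⟨[], rfl, rfl⟩

theorem eatDig_decomp (s : List Char) :
    ∃ p, s = p ++ (eatDig s).1 ∧ (if (eatDig s).2 then pvDpart p = true else p = []) := by
  cases s with
  | nil => exact ⟨[], rfl, rfl⟩
  | cons c r =>
    by_cases hd : c.isDigit = true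
    · obtain ⟨p, hp1, hp2⟩ := eatDigTail_decomp r
      refine ⟨c :: p, ?_, ?_⟩
      · simp [eatDig, hd]
        exact hp1
      · simp [eatDig, pvDpart, hd, hp2]
    · simp only [Bool.not_eq_true] at hd
      exact ⟨[], by simp [eatDig, hd], by simp [eatDig, hd]⟩

theorem dpart_ne_nil {p : List Char} (h : pvDpart p = true) : p ≠ [] := by
  intro hn; subst hn; simp [pvDpart] at h

-- takeWhile/dropWhile on an explicit decomposition
theorem takeDrop_shape {p : Char → Bool} (u : List Char) (c : Char) (v : List Char)
    (hu : ∀ x ∈ u, p x = true) (hc : p c = false) :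
    (u ++ c :: v).takeWhile p = u ∧ (u ++ c :: v).dropWhile p = c :: v := by
  induction u with
  | nil => simp [hc]
  | cons a u ih =>
    have ha := hu a (by simp)
    have ih' := ih (fun x hx => hu x (by simp [hx]))
    simp [ha, ih'.1, ih'.2]

theorem pvMantOk_nodot (m : List Char) (h : pvDpart m = true) : pvMantOk m = true := by
  have hchars := dpart_chars m h
  have hcont : m.contains '.' = false := by
    rw [Bool.eq_false_iff]
    intro hcon
    have hmem : '.' ∈ m := by simpa using hcon
    rcases hchars '.' hmem with hh | hh
    · exact absurd hh (by decide)
    · exact absurd hh (by decide)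
  simp only [pvMantOk, hcont, Bool.false_eq_true, if_false]
  exact h

theorem pvMantOk_dot (a b : List Char)
    (ha : a = [] ∨ pvDpart a = true) (hb : b = [] ∨ pvDpart b = true)
    (hne : a ≠ [] ∨ b ≠ []) : pvMantOk (a ++ '.' :: b) = true := by
  have hachars : ∀ x ∈ a, (fun c => decide (c ≠ '.')) x = true := by
    intro x hx
    rcases ha with rfl | hdp
    · simp at hx
    · rcases dpart_chars a hdp x hx with hh | hh
      · simp [(isDigit_ne hh).2.1]
      · subst hh; decide
  have htd := takeDrop_shape a '.' b hachars (by decide)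
  have hcont : (a ++ '.' :: b).contains '.' = true := by simp
  simp only [pvMantOk, hcont, if_true, htd.1, htd.2, List.tail_cons]
  rcases ha with rfl | hdp <;> rcases hb with rfl | hdp2 <;>
    simp_all [dpart_ne_nil]

theorem pvMantOk_destruct (m : List Char) (h : pvMantOk m = true) :
    (pvDpart m = true) ∨
      ∃ a b, m = a ++ '.' :: b ∧ (a = [] ∨ pvDpart a = true) ∧
        (b = [] ∨ pvDpart b = true) ∧ (a ≠ [] ∨ b ≠ []) := by
  unfold pvMantOk at h
  by_cases hdot : m.contains '.' = true
  · rw [if_pos hdot] at h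
    simp only [Bool.and_eq_true, Bool.or_eq_true] at h
    right
    have hmem : '.' ∈ m := by simpa using hdot
    have hne : m.dropWhile (fun c => c ≠ '.') ≠ [] := by
      intro hnil
      have := (List.dropWhile_eq_nil_iff).mp hnil '.' hmem
      simp at this
    obtain ⟨hd, tl, heq⟩ := List.exists_cons_of_ne_nil hne
    have hhd : hd = '.' := by
      have h1 := List.head_dropWhile_not (fun c => decide (c ≠ '.')) hne
      simp only [heq, List.head_cons] at h1
      simpa using h1
    subst hhd
    refine ⟨m.takeWhile (fun c => c ≠ '.'), tl, ?_, ?_, ?_, ?_⟩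
    · conv_lhs => rw [← List.takeWhile_append_dropWhile (p := fun c => decide (c ≠ '.')) (l := m)]
      rw [heq]
    · rcases h.1.1 with hh | hh
      · exact Or.inl (List.isEmpty_iff.mp hh)
      · exact Or.inr hh
    · rcases h.1.2 with hh | hh
      · rw [heq] at hh; simp [List.isEmpty_iff] at hh; exact Or.inl hh
      · rw [heq] at hh; simpa using Or.inr hh
    · have h3 := h.2
      rw [heq] at h3
      simp only [Bool.not_eq_eq_eq_not, Bool.not_true, Bool.and_eq_false_iff] at h3
      rcases h3 with hh | hh
      · exact Or.inl (by simpa [List.isEmpty_iff] using hh)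
      · exact Or.inr (by simpa [List.isEmpty_iff] using hh)
  · simp only [Bool.not_eq_true] at hdot
    rw [hdot] at h
    simp only [Bool.false_eq_true, if_false] at h
    exact Or.inl h

theorem pvNumOk_build (m r : List Char) (hm : pvMantOk m = true)
    (hr : r = [] ∨ ∃ s', (r = 'e' :: s' ∨ r = 'E' :: s') ∧ pvExpOk s' = true) :
    pvNumOk (m ++ r) = true := by
  have hchars := mantOk_chars m hm
  have hmE : ∀ x ∈ m, (fun c => !(decide (c = 'e') || decide (c = 'E'))) x = true := by
    intro x hx
    rcases hchars x hx with hh | hh | hh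
    · simp [(isDigit_ne hh).2.2.1, (isDigit_ne hh).2.2.2]
    · subst hh; decide
    · subst hh; decide
  rcases hr with rfl | ⟨s', hc, hexp⟩
  · have hany : (m ++ []).any (fun c => c = 'e' || c = 'E') = false := by
      rw [List.any_eq_false]
      intro x hx
      have := hmE x (by simpa using hx)
      simpa using this
    rw [List.append_nil] at hany ⊢
    simp only [pvNumOk, hany, Bool.false_eq_true, if_false]
    exact hm
  · rcases hc with rfl | rfl
    · have htd := takeDrop_shape m 'e' s' hmE (by decide)
      have hany : (m ++ 'e' :: s').any (fun c => c = 'e' || c = 'E') = true := by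
        rw [List.any_eq_true]
        exact ⟨'e', by simp, by decide⟩
      simp only [pvNumOk, hany, if_true, htd.1, htd.2, List.tail_cons, hm, hexp, Bool.and_self]
    · have htd := takeDrop_shape m 'E' s' hmE (by decide)
      have hany : (m ++ 'E' :: s').any (fun c => c = 'e' || c = 'E') = true := by
        rw [List.any_eq_true]
        exact ⟨'E', by simp, by decide⟩
      simp only [pvNumOk, hany, if_true, htd.1, htd.2, List.tail_cons, hm, hexp, Bool.and_self]

theorem pvNumOk_destruct (t : List Char) (h : pvNumOk t = true) :
    ∃ m r, t = m ++ r ∧ pvMantOk m = true ∧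
      (r = [] ∨ ∃ s', (r = 'e' :: s' ∨ r = 'E' :: s') ∧ pvExpOk s' = true) := by
  unfold pvNumOk at h
  by_cases hany : t.any (fun c => c = 'e' || c = 'E') = true
  · rw [if_pos hany] at h
    simp only [Bool.and_eq_true] at h
    have hne : t.dropWhile (fun c => !(c = 'e' || c = 'E')) ≠ [] := by
      intro hnil
      obtain ⟨e0, he0, he0'⟩ := List.any_eq_true.mp hany
      have := (List.dropWhile_eq_nil_iff).mp hnil e0 he0
      simp only [Bool.not_eq_eq_eq_not, Bool.not_true] at this
      rw [this] at he0'
      exact Bool.false_ne_true he0'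
    obtain ⟨hd, tl, heq⟩ := List.exists_cons_of_ne_nil hne
    have hhd : hd = 'e' ∨ hd = 'E' := by
      have h1 := List.head_dropWhile_not (fun c => !(c = 'e' || c = 'E')) hne
      simp only [heq, List.head_cons] at h1
      simp only [Bool.not_eq_eq_eq_not, Bool.not_false, Bool.or_eq_true, decide_eq_true_eq] at h1
      tauto
    refine ⟨t.takeWhile (fun c => !(c = 'e' || c = 'E')), hd :: tl, ?_, h.1, ?_⟩
    · conv_lhs => rw [← List.takeWhile_append_dropWhile
        (p := fun c => !(decide (c = 'e') || decide (c = 'E'))) (l := t)]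
      rw [heq]
    · right
      refine ⟨tl, ?_, ?_⟩
      · rcases hhd with rfl | rfl
        · exact Or.inl rfl
        · exact Or.inr rfl
      · have := h.2
        rw [heq] at this
        simpa using this
  · simp only [Bool.not_eq_true] at hany
    rw [hany] at h
    simp only [Bool.false_eq_true, if_false] at h
    exact ⟨t, [], by simp, h, Or.inl rfl⟩

theorem eatMant_decomp (t r : List Char) (h : eatMant t = some r) :
    ∃ m, t = m ++ r ∧ pvMantOk m = true := by
  unfold eatMant at h
  obtain ⟨p1, ht1, hp1⟩ := eatDig_decomp t
  split at h
  next r2 d1 heq =>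
    rw [heq] at ht1 hp1
    have ht1' : t = p1 ++ '.' :: r2 := ht1
    obtain ⟨p2, ht2, hp2⟩ := eatDig_decomp r2
    rcases h2 : eatDig r2 with ⟨r3, d2⟩
    rw [h2] at h ht2 hp2
    have ht2' : r2 = p2 ++ r3 := ht2
    have h' : (if (d1 || d2) = true then some r3 else none) = some r := h
    split_ifs at h' with hd
    · injection h' with h'
      subst h'
      cases d1 with
      | true =>
        have hp1' : pvDpart p1 = true := by simpa using hp1
        cases d2 with
        | true =>
          have hp2' : pvDpart p2 = true := by simpa using hp2
          refine ⟨p1 ++ '.' :: p2, ?_, ?_⟩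
          · rw [ht1', ht2']; simp
          · exact pvMantOk_dot p1 p2 (Or.inr hp1') (Or.inr hp2') (Or.inl (dpart_ne_nil hp1'))
        | false =>
          have hp2' : p2 = [] := by simpa using hp2
          subst hp2'
          simp only [List.nil_append] at ht2'
          refine ⟨p1 ++ ['.'], ?_, ?_⟩
          · rw [ht1', ht2']; simp
          · have := pvMantOk_dot p1 [] (Or.inr hp1') (Or.inl rfl) (Or.inl (dpart_ne_nil hp1'))
            simpa using this
      | false =>
        have hp1' : p1 = [] := by simpa using hp1
        subst hp1'
        simp only [List.nil_append] at ht1'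
        cases d2 with
        | true =>
          have hp2' : pvDpart p2 = true := by simpa using hp2
          refine ⟨'.' :: p2, ?_, ?_⟩
          · rw [ht1', ht2']; simp
          · have := pvMantOk_dot [] p2 (Or.inl rfl) (Or.inr hp2') (Or.inr (dpart_ne_nil hp2'))
            simpa using this
        | false => simp at hd
  next r1 d1 hsh heq =>
    rw [heq] at ht1 hp1
    have ht1' : t = p1 ++ r1 := ht1
    have h' : (if d1 = true then some r1 else none) = some r := h
    split_ifs at h' with hd
    · injection h' with h'
      subst h'
      subst hd
      have hp1' : pvDpart p1 = true := by simpa using hp1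
      exact ⟨p1, ht1', pvMantOk_nodot p1 hp1'⟩

theorem numOkAlt_of_eatMant (t r : List Char) (hM : eatMant t = some r)
    (hr : r = [] ∨ ∃ s', (r = 'e' :: s' ∨ r = 'E' :: s') ∧ pvExpOk s' = true) :
    numOkAlt t = true := by
  rcases hr with rfl | ⟨s', hc, hexp⟩
  · simp [numOkAlt, hM]
  · rcases hc with rfl | rfl <;> simp [numOkAlt, hM, eatExpOk_eq, hexp]

theorem numOkAlt_fwd (t : List Char) (h : numOkAlt t = true) : pvNumOk t = true := by
  unfold numOkAlt at h
  split at h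
  next => exact absurd h Bool.false_ne_true
  next hM =>
    obtain ⟨m, rfl, hm⟩ := eatMant_decomp t [] hM
    exact pvNumOk_build m [] hm (Or.inl rfl)
  next c r' hM =>
    simp only [Bool.and_eq_true, Bool.or_eq_true, decide_eq_true_eq] at h
    obtain ⟨m, rfl, hm⟩ := eatMant_decomp _ _ hM
    refine pvNumOk_build m (c :: r') hm (Or.inr ⟨r', ?_, ?_⟩)
    · rcases h.1 with rfl | rfl
      · exact Or.inl rfl
      · exact Or.inr rfl
    · rw [← eatExpOk_eq]; exact h.2

theorem numOkAlt_bwd (t : List Char) (h : pvNumOk t = true) : numOkAlt t = true := by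
  obtain ⟨m, r, rfl, hm, hr⟩ := pvNumOk_destruct t h
  have hrGood : ∀ c, r.head? = some c → c.isDigit = false ∧ c ≠ '_' := by
    intro c hc
    rcases hr with rfl | ⟨s', hcc, _⟩
    · simp at hc
    · rcases hcc with rfl | rfl <;>
        (simp only [List.head?_cons, Option.some_inj] at hc; subst hc; exact ⟨by decide, by decide⟩)
  rcases pvMantOk_destruct m hm with hdp | ⟨a, b, rfl, ha, hb, hne⟩
  · have hED : eatDig (m ++ r) = (r, true) := eatDig_append m r hdp hrGood
    have hM : eatMant (m ++ r) = some r := by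
      rcases hr with rfl | ⟨s', hcc, _⟩
      · rw [List.append_nil] at hED ⊢
        simp [eatMant, hED]
      · rcases hcc with rfl | rfl <;> simp [eatMant, hED]
    exact numOkAlt_of_eatMant _ _ hM hr
  · have hassoc : (a ++ '.' :: b) ++ r = a ++ '.' :: (b ++ r) := by simp
    rw [hassoc]
    have hInner : eatDig (b ++ r) = (r, if b = [] then false else true) ∧
        (b = [] → b ++ r = r) := by
      rcases hb with rfl | hdpb
      · refine ⟨?_, fun _ => by simp⟩
        simp only [List.nil_append]
        rcases hr with rfl | ⟨s', hcc, _⟩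
        · rfl
        · rcases hcc with rfl | rfl <;> simp [eatDig]
      · have hbne := dpart_ne_nil hdpb
        rw [if_neg hbne]
        exact ⟨eatDig_append b r hdpb hrGood, fun hh => absurd hh hbne⟩
    have hM : eatMant (a ++ '.' :: (b ++ r)) = some r := by
      rcases ha with rfl | hdpa
      · have h1 : eatDig ('.' :: (b ++ r)) = ('.' :: (b ++ r), false) := by simp [eatDig]
        have hbne : b ≠ [] := by
          rcases hne with hh | hh
          · exact absurd rfl hh
          · exact hh
        rw [if_neg hbne] at hInner
        simp [eatMant, h1, hInner.1]
      · have h1 : eatDig (a ++ '.' :: (b ++ r)) = ('.' :: (b ++ r), true) :=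
          eatDig_append a _ hdpa (by
            intro c hc
            simp only [List.head?_cons, Option.some_inj] at hc
            subst hc
            exact ⟨by decide, by decide⟩)
        by_cases hbnil : b = []
        · rw [if_pos hbnil] at hInner
          simp [eatMant, h1, hInner.1]
        · rw [if_neg hbnil] at hInner
          simp [eatMant, h1, hInner.1]
    exact numOkAlt_of_eatMant _ _ hM hr

theorem numOk_eq (t : List Char) : numOkAlt t = pvNumOk t := by
  by_cases hA : numOkAlt t = true
  · rw [hA, numOkAlt_fwd t hA]
  · by_cases hB : pvNumOk t = true
    · exact absurd (numOkAlt_bwd t hB) hA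
    · simp only [Bool.not_eq_true] at hA hB
      rw [hA, hB]

theorem names_contains_eq (t : List Char) :
    (["inf", "infinity", "nan"].contains (String.ofList t)) =
      (t = "inf".toList || t = "infinity".toList || t = "nan".toList) := by
  have h : ∀ (s : String), (String.ofList t = s) = (t = s.toList) := by
    intro s
    by_cases hh : t = s.toList
    · subst hh; simp
    · have : String.ofList t ≠ s := by
        intro hcon
        exact hh (by rw [← hcon, String.toList_ofList])
      simp [this, hh]
  by_cases h1 : t = "inf".toList <;> by_cases h2 : t = "infinity".toList <;>
    by_cases h3 : t = "nan".toList <;> simp [h, h1, h2, h3, Bool.or_assoc]; rfl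

theorem if_or (b c : Bool) : (if b = true then true else c) = (b || c) := by
  cases b <;> simp

theorem floatOkAlt_eq (cs : List Char) : floatOkAlt cs = pvFloatOk cs := by
  simp only [floatOkAlt, pvFloatOk, pvFloatCore, dropSignB_eq, numOk_eq, names_contains_eq, if_or]

theorem chars_slice_neg_one (l : List Char) :
    PySem.Chars.slice l none (some (-1)) = l.dropLast := by
  simpa using PySem.Str.slice_to_neg_one (String.ofList l)

theorem isIn_singleton_iff (c : Char) (l : List Char) :
    PySem.Chars.isIn [c] l = true ↔ c ∈ l := by
  rw [PySem.Chars.isIn_iff_infix]; exact List.singleton_infix_iff _ _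

theorem contains_eq_isIn (c : Char) (l : List Char) :
    l.contains c = PySem.Chars.isIn [c] l := by
  by_cases hm : c ∈ l
  · have h1 : PySem.Chars.isIn [c] l = true := (isIn_singleton_iff c l).mpr hm
    simp [h1, hm]
  · have h1 : PySem.Chars.isIn [c] l = false := by
      rw [Bool.eq_false_iff]
      intro hx
      exact hm ((isIn_singleton_iff c l).mp hx)
    simp [h1, hm]

theorem ifNumAlt_eq (w : String) : ifNumAlt w = ifNum w := by
  simp only [ifNumAlt, ifNum, ifNumChars, contains_eq_isIn, chars_slice_neg_one, floatOkAlt_eq]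

theorem reorgGo_eq (ws : List String) : ∀ (d : PySem.Dict String String) (parts : List String),
    reorgGo d parts ws = insertAll d (seqOf ws parts) := by
  induction ws with
  | nil => intro d parts; simp [reorgGo, seqOf, insertAll]
  | cons w ws ih =>
    intro d parts
    cases h : ifNum w with
    | true =>
      simpa [reorgGo, seqOf, ifNumAlt_eq, h, insertAll] using
        ih (d.insert (PySem.Str.join " " parts) w) []
    | false => simpa [reorgGo, seqOf, ifNumAlt_eq, h, insertAll] using ih d (parts ++ [w])


-- ifNum of A's accumulated label string is always false
theorem labelChars_shape : ∀ (a : List String), a ≠ [] →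
    ∃ U, labelChars a = U ++ [' '] := by
  intro a
  induction a with
  | nil => intro hh; exact absurd rfl hh
  | cons x xs ihx =>
    intro _
    by_cases hxs : xs = []
    · subst hxs
      exact ⟨x.toList, by simp [labelChars]⟩
    · obtain ⟨U, hU⟩ := ihx hxs
      refine ⟨x.toList ++ [' '] ++ U, ?_⟩
      simp only [labelChars, List.map_cons, List.flatten_cons] at hU ⊢
      rw [hU]
      simp

theorem mem_labelChars {c : Char} {x : String} {parts : List String}
    (hx : x ∈ parts) (hc : c ∈ x.toList) : c ∈ labelChars parts := by
  exact List.mem_flatten.mpr ⟨x.toList ++ [' '], List.mem_map_of_mem hx, by simp [hc]⟩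

theorem ifNum_label (parts : List String) (h : ∀ p ∈ parts, ifNum p = false) :
    ifNumChars (labelChars parts) = false := by
  cases parts with
  | nil => decide
  | cons p ps =>
    by_cases hp : PySem.Chars.isIn ['%'] (labelChars (p :: ps)) = true
    · obtain ⟨U, hU⟩ := labelChars_shape (p :: ps) (by simp)
      have hpm : '%' ∈ labelChars (p :: ps) := (isIn_singleton_iff _ _).mp hp
      have hpmU : '%' ∈ U := by
        rw [hU] at hpm
        rcases List.mem_append.mp hpm with hh | hh
        · exact hh
        · simp at hh
      have hslice : PySem.Chars.slice (labelChars (p :: ps)) none (some (-1)) = U := by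
        rw [hU, chars_slice_neg_one]
        exact List.dropLast_concat
      simp only [ifNumChars, hp, if_true]
      rw [hslice]
      split
      · exact floatOk_false_of_pct (List.mem_filter.mpr ⟨hpmU, by decide⟩)
      · exact floatOk_false_of_pct hpmU
    · have hpm : '%' ∉ labelChars (p :: ps) := by
        intro hcon
        exact hp ((isIn_singleton_iff _ _).mpr hcon)
      have key : ∀ x ∈ p :: ps, pvFloatOk (x.toList.filter (fun c => c ≠ ',')) = false := by
        intro x hx
        have hnf := h x hx
        have hpmx : PySem.Chars.isIn ['%'] x.toList = false := by
          rw [Bool.eq_false_iff]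
          intro hcon
          exact hpm (mem_labelChars hx ((isIn_singleton_iff _ _).mp hcon))
        simp only [ifNum, ifNumChars, hpmx, Bool.false_eq_true, if_false] at hnf
        rcases hcomma : PySem.Chars.isIn [','] x.toList with hf | ht
        · rw [hcomma, if_neg (by simp)] at hnf
          rwa [List.filter_eq_self.mpr (fun a ha => by
            simp only [ne_eq, decide_eq_true_eq]
            intro hcon
            subst hcon
            exact absurd ((isIn_singleton_iff _ _).mpr ha) (by simp [hcomma]))]
        · rwa [hcomma, if_pos rfl] at hnf
      have hfilter : (labelChars (p :: ps)).filter (fun c => c ≠ ',') =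
          (((p :: ps).map (fun x => x.toList.filter (fun c => c ≠ ','))).map
            (fun q => q ++ [' '])).flatten := by
        unfold labelChars
        rw [List.filter_flatten, List.map_map, List.map_map]
        congr 1
        apply List.map_congr_left
        intro x _
        simp [List.filter_append]
      have hglue := glue_floatOk_false
        ((p :: ps).map (fun x => x.toList.filter (fun c => c ≠ ',')))
        (by
          intro qq hqq
          obtain ⟨x, hx, rfl⟩ := List.mem_map.mp hqq
          exact key x hx)
      simp only [ifNumChars, hp, Bool.false_eq_true, if_false]
      split
      · rw [hfilter]
        exact hglue
      · next hcomma =>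
        rw [show labelChars (p :: ps) = (labelChars (p :: ps)).filter (fun c => c ≠ ',') from
          (List.filter_eq_self.mpr (fun a ha => by
            simp only [ne_eq, decide_eq_true_eq]
            intro hcon
            subst hcon
            exact hcomma ((isIn_singleton_iff _ _).mpr ha))).symm]
        rw [hfilter]
        exact hglue

-- join = accumulated label minus its trailing space
theorem join_chars_eq_dropLast : ∀ (parts : List String),
    PySem.Chars.join [' '] (parts.map String.toList) = (labelChars parts).dropLast := by
  intro parts
  induction parts with
  | nil => simp [labelChars, PySem.Chars.join_nil]
  | cons p ps ih =>
    cases ps with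
    | nil => simp [labelChars, PySem.Chars.join_singleton]
    | cons q rest =>
      rw [List.map_cons, List.map_cons, PySem.Chars.join_cons_cons]
      have hne : labelChars (q :: rest) ≠ [] := by simp [labelChars]
      have hsplit : labelChars (p :: q :: rest) =
          (p.toList ++ [' ']) ++ labelChars (q :: rest) := by
        simp [labelChars]
      rw [hsplit, List.dropLast_append_of_ne_nil hne, ← ih]
      simp

theorem join_eq_dropLast (parts : List String) :
    (PySem.Str.join " " parts).toList = (labelChars parts).dropLast := by
  rw [PySem.Str.toList_join]
  exact join_chars_eq_dropLast parts

-- A's strip pass turns the label into B's join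
theorem strip_label (parts : List String) (h : ∀ p ∈ parts, ifNum p = false) :
    (if !(ifNum (String.ofList (labelChars parts))) then
        PySem.Str.slice (String.ofList (labelChars parts)) none (some (-1))
      else String.ofList (labelChars parts)) = PySem.Str.join " " parts := by
  have hifnum : ifNum (String.ofList (labelChars parts)) = false := by
    unfold ifNum
    rw [String.toList_ofList]
    exact ifNum_label parts h
  rw [hifnum]
  simp only [Bool.not_false, if_true]
  apply String.toList_inj.mp
  rw [PySem.Str.slice_to_neg_one, String.toList_ofList, join_eq_dropLast]

-- the main correspondence: strip-mapped `new` = flattened pair sequence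
theorem mapM (ws : List String) : ∀ (parts : List String), (∀ p ∈ parts, ifNum p = false) →
    (newOf ws (labelChars parts)).map
        (fun s => if !(ifNum s) then PySem.Str.slice s none (some (-1)) else s) =
      ((seqOf ws parts).map (fun p => [p.1, p.2])).flatten := by
  induction ws with
  | nil => intro parts _; simp [newOf, seqOf]
  | cons w ws ih =>
    intro parts hparts
    cases hw : ifNum w with
    | true =>
      simp only [newOf, seqOf, hw, if_true, List.map_cons, List.flatten_cons]
      rw [strip_label parts hparts]
      simp only [Bool.not_true, Bool.false_eq_true, if_false]
      have hrw : newOf ws [] = newOf ws (labelChars []) := rfl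
      rw [hrw, ih [] (by simp)]
      simp
    | false =>
      simp only [newOf, seqOf, hw, Bool.false_eq_true, if_false]
      have hcat : labelChars parts ++ w.toList ++ [' '] = labelChars (parts ++ [w]) := by
        simp [labelChars]
      rw [hcat]
      refine ih (parts ++ [w]) ?_
      intro x hx
      rcases List.mem_append.mp hx with hx | hx
      · exact hparts x hx
      · rcases List.mem_singleton.mp hx with rfl
        exact hw

theorem pairFlat_length (l : List (String × String)) :
    (((l.map (fun p => [p.1, p.2])).flatten).length : ℤ) = 2 * (l.length : ℤ) := by
  induction l with
  | nil => simp
  | cons a l ih =>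
    simp only [List.map_cons, List.flatten_cons, List.length_append, List.length_cons,
      List.length_nil]
    push_cast at ih ⊢
    omega

theorem pairLoop_aux : ∀ (l : List (String × String)) (d : PySem.Dict String String),
    (List.range l.length).foldl
      (fun (d : PySem.Dict String String) (k : ℕ) => d.insert
        (PySem.List.pyGetD ((l.map (fun p => [p.1, p.2])).flatten) (2 * (k : ℤ)) "")
        (PySem.List.pyGetD ((l.map (fun p => [p.1, p.2])).flatten) (2 * (k : ℤ) + 1) "")) d
    = insertAll d l := by
  intro l
  induction l with
  | nil => intro d; simp [insertAll]
  | cons a l ih =>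
    intro d
    rw [List.length_cons, List.range_succ_eq_map, List.foldl_cons, List.foldl_map]
    have h0 : d.insert
        (PySem.List.pyGetD (((a :: l).map (fun p => [p.1, p.2])).flatten)
          (2 * ((0 : ℕ) : ℤ)) "")
        (PySem.List.pyGetD (((a :: l).map (fun p => [p.1, p.2])).flatten)
          (2 * ((0 : ℕ) : ℤ) + 1) "") = d.insert a.1 a.2 := by
      simp only [List.map_cons, List.flatten_cons]
      norm_num [PySem.List.pyGetD_ofNat']
    rw [h0]
    have hfun : (fun (d : PySem.Dict String String) (k : ℕ) => d.insert
          (PySem.List.pyGetD (((a :: l).map (fun p => [p.1, p.2])).flatten)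
            (2 * ((k.succ : ℕ) : ℤ)) "")
          (PySem.List.pyGetD (((a :: l).map (fun p => [p.1, p.2])).flatten)
            (2 * ((k.succ : ℕ) : ℤ) + 1) "")) =
        (fun (d : PySem.Dict String String) (k : ℕ) => d.insert
          (PySem.List.pyGetD ((l.map (fun p => [p.1, p.2])).flatten) (2 * (k : ℤ)) "")
          (PySem.List.pyGetD ((l.map (fun p => [p.1, p.2])).flatten) (2 * (k : ℤ) + 1) "")) := by
      funext d k
      have e2 : (2 : ℤ) * ((k.succ : ℕ) : ℤ) = ((2 * k + 2 : ℕ) : ℤ) := by push_cast; ring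
      have e3 : (2 : ℤ) * ((k.succ : ℕ) : ℤ) + 1 = ((2 * k + 3 : ℕ) : ℤ) := by push_cast; ring
      have e4 : (2 : ℤ) * ((k : ℕ) : ℤ) = ((2 * k : ℕ) : ℤ) := by push_cast; ring
      have e5 : (2 : ℤ) * ((k : ℕ) : ℤ) + 1 = ((2 * k + 1 : ℕ) : ℤ) := by push_cast; ring
      rw [e3, e2, e5, e4, PySem.List.pyGetD_natCast, PySem.List.pyGetD_natCast,
        PySem.List.pyGetD_natCast, PySem.List.pyGetD_natCast]
      simp only [List.map_cons, List.flatten_cons]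
      have g1 : ∀ (x y : String) (t : List String) (n : ℕ) (dd : String),
          (x :: y :: t).getD (n + 2) dd = t.getD n dd := by
        intro x y t n dd
        rfl
      rw [show 2 * k + 3 = (2 * k + 1) + 2 from by omega]
      rw [List.cons_append, List.cons_append, g1, g1]
      simp
    rw [hfun]
    exact ih (d.insert a.1 a.2)

-- the pairing loop over range(0, len-1, 2) on a flattened pair list inserts the pairs in order
theorem pairLoop : ∀ (l : List (String × String)) (d : PySem.Dict String String),
    ((PySem.List.pyRange 0 ((((l.map (fun p => [p.1, p.2])).flatten.length : Nat) : Int) - 1) 2).foldl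
      (fun (d : PySem.Dict String String) i =>
        d.insert (PySem.List.pyGetD ((l.map (fun p => [p.1, p.2])).flatten) i "")
          (PySem.List.pyGetD ((l.map (fun p => [p.1, p.2])).flatten) (i + 1) "")) d) =
    insertAll d l := by
  intro l d
  rw [pairFlat_length]
  by_cases hn : l = []
  · subst hn
    simp only [List.length_nil, Nat.cast_zero, mul_zero, zero_sub]
    rw [PySem.List.pyRange_of_pos 0 _ (by norm_num)]
    rw [if_neg (by norm_num)]
    simp [insertAll]
  · have hn' : 1 ≤ l.length := List.length_pos_iff.mpr hn
    rw [PySem.List.pyRange_of_pos 0 _ (by norm_num)]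
    have hcount : (if (0:ℤ) < 2 * (l.length : ℤ) - 1 then
        (((2 * (l.length : ℤ)) - 1 - 0 + 2 - 1) / 2).toNat else 0) = l.length := by
      rw [if_pos (by omega)]
      omega
    rw [hcount, List.foldl_map]
    have hfun : (fun (d : PySem.Dict String String) (k : ℕ) => d.insert
          (PySem.List.pyGetD ((l.map (fun p => [p.1, p.2])).flatten) (0 + 2 * (k : ℤ)) "")
          (PySem.List.pyGetD ((l.map (fun p => [p.1, p.2])).flatten) (0 + 2 * (k : ℤ) + 1) "")) =
        (fun (d : PySem.Dict String String) (k : ℕ) => d.insert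
          (PySem.List.pyGetD ((l.map (fun p => [p.1, p.2])).flatten) (2 * (k : ℤ)) "")
          (PySem.List.pyGetD ((l.map (fun p => [p.1, p.2])).flatten) (2 * (k : ℤ) + 1) "")) := by
      funext d k
      norm_num
    rw [hfun]
    exact pairLoop_aux l d

-- ===== VERDICT (by name: the statement is the Claim_ definition above) =====
theorem ReOrg_spec : Claim_equal_ReOrg := by
  intro mylist _
  unfold Spec_ReOrg ReOrg ReOrg_alt
  simp only [foldA, List.nil_append]
  have hm : (newOf mylist (labelChars [])).map
      (fun s => if !(ifNum s) then PySem.Str.slice s none (some (-1)) else s) =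
      ((seqOf mylist []).map (fun p => [p.1, p.2])).flatten := mapM mylist [] (by simp)
  have hrw : newOf mylist [] = newOf mylist (labelChars []) := rfl
  rw [hrw, hm, pairLoop, reorgGo_eq]
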